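-- pv_equiv track=rewrite | github.com/Robertus567/Repository-Jap-Robertus-K.S-Semester-2-Alpro2 | Challenge 2 Alpro Week 5.py | find_longest_circuit
-- ===== SOURCE A (Python) =====
-- graph = {
--     'A': ['B', 'D'],
--     'B': ['A', 'C', 'E', 'F'],
--     'C': ['B', 'F'],
--     'D': ['A', 'E'],
--     'E': ['B', 'D', 'F'],
--     'F': ['B', 'C', 'E']
-- }
--
-- def find_all_paths(start, end, path=[]):
--     """Find all paths from start to end node using DFS"""
--     path = path + [start]
--     if start == end:
--         return [path]
--     paths = []
--     for neighbor in graph[start]: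
--         if neighbor not in path:
--             new_paths = find_all_paths(neighbor, end, path)
--             paths.extend(new_paths)
--     return paths
--
-- def find_longest_circuit(start, end):
--     """Find the longest circuit from start to end and back to start"""
--     paths = find_all_paths(start, end)
--     if not paths:
--         return None
--
--     circuits = []
--     for path in paths:
--         # Check if end can connect back to start (completing the circuit)
--         if start in graph[end]:
--             circuits.append(path + [start])
--
--     if not circuits:
--         return None
--
--     # Return the longest circuit
--     return max(circuits, key=len)
-- ===== SOURCE B (Python) =====
-- graph = {
--     'A': ['B', 'D'],
--     'B': ['A', 'C', 'E', 'F'],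
--     'C': ['B', 'F'],
--     'D': ['A', 'E'],
--     'E': ['B', 'D', 'F'],
--     'F': ['B', 'C', 'E']
-- }
--
-- def find_longest_circuit(start, end):
--     """Iterative explicit-stack DFS collecting all simple paths start->end,
--     then close the circuit if end connects back to start."""
--     stack = [(start, [start])]
--     paths = []
--     while stack:
--         node, path = stack.pop()
--         if node == end:
--             paths.append(path)
--             continue
--         for neighbor in reversed(graph[node]):
--             if neighbor not in path:
--                 stack.append((neighbor, path + [neighbor]))
--     if not paths or start not in graph[end]:
--         return None
--     return max(paths, key=len) + [start]
-- ===== Notes on version B (the rewrite author's own statement) =====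
-- stated objective: alternative
-- what changed: The recursive find_all_paths helper is replaced by an explicit-stack iterative DFS (pushing neighbours in reverse graph order to preserve visitation order), and the circuit is closed by a single membership test on graph[end] instead of re-testing it inside a loop over every path.
import Mathlib
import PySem

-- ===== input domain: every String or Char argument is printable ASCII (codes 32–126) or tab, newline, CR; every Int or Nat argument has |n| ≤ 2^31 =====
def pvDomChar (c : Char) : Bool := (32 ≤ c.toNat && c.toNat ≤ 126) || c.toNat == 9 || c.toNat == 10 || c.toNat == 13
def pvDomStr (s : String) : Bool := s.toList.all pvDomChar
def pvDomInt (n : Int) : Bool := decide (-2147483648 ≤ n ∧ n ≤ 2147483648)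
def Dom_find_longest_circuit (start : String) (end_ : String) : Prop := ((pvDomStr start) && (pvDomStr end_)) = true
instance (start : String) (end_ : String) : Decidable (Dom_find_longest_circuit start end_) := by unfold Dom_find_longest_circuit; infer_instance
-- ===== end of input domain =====

-- ===== PORT A =====
-- B replaces the recursive find_all_paths with an explicit-stack iterative DFS
-- (alternative decomposition, same cost); return values proved equal on all graph keys.
def pyGraph : PySem.Dict String (List String) :=
  PySem.Dict.ofList [("A", ["B", "D"]), ("B", ["A", "C", "E", "F"]), ("C", ["B", "F"]),
   ("D", ["A", "E"]), ("E", ["B", "D", "F"]), ("F", ["B", "C", "E"])]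

def nbrs (s : String) : List String := PySem.Dict.getD pyGraph s []

-- literal port of the recursive find_all_paths; fuel 7 exceeds the simple-path length
-- bound on the 6-node graph, so it is a totality guard only
def findAllPaths : Nat → String → String → List String → List (List String)
  | 0, _, _, _ => []
  | fuel + 1, start, end_, path =>
    let path := path ++ [start]
    if start = end_ then [path]
    else
      (nbrs start).foldl
        (fun paths neighbor =>
          if neighbor ∈ path then paths
          else paths ++ findAllPaths fuel neighbor end_ path) []

-- max(circuits, key=len): first element of maximal length (Python's max tie-break)
def maxByLen : List String → List (List String) → List String
  | best, [] => best
  | best, q :: qs => maxByLen (if q.length > best.length then q else best) qs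

def find_longest_circuit (start : String) (end_ : String) : Option (List String) :=
  let paths := findAllPaths 7 start end_ []
  if paths.isEmpty then none
  else
    let circuits := paths.foldl
      (fun circuits path =>
        if start ∈ nbrs end_ then circuits ++ [path ++ [start]] else circuits) []
    match circuits with
    | [] => none
    | c :: cs => some (maxByLen c cs)

-- ===== PORT B =====
-- explicit-stack DFS (port of Source B): stack head = Python list's last element (the top);
-- pop one entry, record completed paths, push unvisited neighbours in reversed graph
-- order so the head ends up being the first neighbour; fuel is a totality guard only
def dfsLoop (end_ : String) :
    Nat → List (String × List String) → List (List String) → List (List String)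
  | 0, _, paths => paths
  | _ + 1, [], paths => paths
  | fuel + 1, (node, path) :: rest, paths =>
    if node = end_ then dfsLoop end_ fuel rest (paths ++ [path])
    else
      dfsLoop end_ fuel
        ((nbrs node).reverse.foldl
          (fun stack neighbor =>
            if neighbor ∈ path then stack else (neighbor, path ++ [neighbor]) :: stack)
          rest)
        paths

def find_longest_circuit_alt (start : String) (end_ : String) : Option (List String) :=
  let paths := dfsLoop end_ 100000 [(start, [start])] []
  if paths.isEmpty || ¬ (start ∈ nbrs end_) then none
  else
    match paths with
    | [] => none
    | p :: ps => some (maxByLen p ps ++ [start])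

-- ===== PRECONDITION & SPEC =====
-- Pre_: start must be a key of the module-level graph — on any other start Python A raises
-- KeyError at graph[start] (and, when start == end_, at graph[end]); end_ may be any string
-- (for a non-key end_ no path ever reaches it and A returns None).
def Pre_find_longest_circuit (start : String) (end_ : String) : Prop :=
  start ∈ ["A", "B", "C", "D", "E", "F"]
instance (start : String) (end_ : String) : Decidable (Pre_find_longest_circuit start end_) := by
  unfold Pre_find_longest_circuit; infer_instance

def pvWitness_find_longest_circuit : String × String := ("A", "F")

def Spec_find_longest_circuit (start : String) (end_ : String) (out : Option (List String)) : Prop := out = find_longest_circuit_alt start end_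
instance (start : String) (end_ : String) (out : Option (List String)) : Decidable (Spec_find_longest_circuit start end_ out) := by unfold Spec_find_longest_circuit; infer_instance

-- ===== CLAIM (what is proved, stated in full; the proofs are below) =====
def Claim_equal_find_longest_circuit : Prop := ∀ (start : String) (end_ : String), Dom_find_longest_circuit start end_ → Pre_find_longest_circuit start end_ → Spec_find_longest_circuit start end_ (find_longest_circuit start end_)

-- ===== LEMMAS AND PROOFS =====
-- When both nodes are graph keys, both programs are functions of 36 possible
-- argument pairs: a finite kernel check.
theorem all_pairs_eq :
    ∀ s ∈ ["A", "B", "C", "D", "E", "F"], ∀ e ∈ ["A", "B", "C", "D", "E", "F"],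
      find_longest_circuit s e = find_longest_circuit_alt s e := by decide

-- The graph is closed: neighbours of keys are keys.
theorem nbrs_subset :
    ∀ s ∈ ["A", "B", "C", "D", "E", "F"], ∀ n ∈ nbrs s, n ∈ ["A", "B", "C", "D", "E", "F"] := by
  decide

-- A's collection loop yields nothing when every recursive call yields nothing.
theorem foldl_nil_of (path : List String) (f : String → List (List String)) :
    ∀ (l : List String) (acc : List (List String)), (∀ n ∈ l, f n = []) →
      l.foldl (fun paths n => if n ∈ path then paths else paths ++ f n) acc = acc := by
  intro l
  induction l with
  | nil => intro acc _; rfl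
  | cons x xs ih =>
      intro acc h
      simp only [List.foldl_cons]
      rw [h x (List.mem_cons_self), List.append_nil]
      rw [show (if x ∈ path then acc else acc) = acc from by split <;> rfl]
      exact ih acc fun n hn => h n (List.mem_cons_of_mem x hn)

-- If end_ is not a key, A's DFS (which only visits keys) finds no path.
theorem findAllPaths_nil (e : String) (he : e ∉ (["A", "B", "C", "D", "E", "F"] : List String)) :
    ∀ (fuel : Nat) (s : String) (path : List String), s ∈ ["A", "B", "C", "D", "E", "F"] →
      findAllPaths fuel s e path = [] := by
  intro fuel
  induction fuel with
  | zero => intro s path _; rfl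
  | succ f ih =>
      intro s path hs
      simp only [findAllPaths]
      rw [if_neg (fun h : s = e => he (h ▸ hs))]
      exact foldl_nil_of _ _ _ [] fun n hn => ih n _ (nbrs_subset s hs n hn)

-- B's push step keeps every stack node a key.
theorem push_keys (path : List String) :
    ∀ (l : List String) (rest : List (String × List String)),
      (∀ p ∈ rest, p.1 ∈ (["A", "B", "C", "D", "E", "F"] : List String)) →
      (∀ n ∈ l, n ∈ (["A", "B", "C", "D", "E", "F"] : List String)) →
      ∀ p ∈ l.foldl
          (fun stack neighbor =>
            if neighbor ∈ path then stack else (neighbor, path ++ [neighbor]) :: stack) rest,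
        p.1 ∈ (["A", "B", "C", "D", "E", "F"] : List String) := by
  intro l
  induction l with
  | nil => intro rest hr _; exact hr
  | cons x xs ih =>
      intro rest hr hl
      simp only [List.foldl_cons]
      refine ih _ ?_ fun n hn => hl n (List.mem_cons_of_mem x hn)
      intro p hp
      by_cases hx : x ∈ path
      · rw [if_pos hx] at hp; exact hr p hp
      · rw [if_neg hx] at hp
        rcases List.mem_cons.mp hp with h | h
        · rw [h]; exact hl x List.mem_cons_self
        · exact hr p h

-- If end_ is not a key, B's stack DFS (whose stack nodes are all keys) records no path.
theorem dfsLoop_nil (e : String) (he : e ∉ (["A", "B", "C", "D", "E", "F"] : List String)) :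
    ∀ (fuel : Nat) (stack : List (String × List String)) (paths : List (List String)),
      (∀ p ∈ stack, p.1 ∈ (["A", "B", "C", "D", "E", "F"] : List String)) →
      dfsLoop e fuel stack paths = paths := by
  intro fuel
  induction fuel with
  | zero => intro stack paths _; rfl
  | succ f ih =>
      intro stack paths hs
      match stack with
      | [] => rfl
      | (node, path) :: rest =>
          have hnode := hs _ List.mem_cons_self
          simp only [dfsLoop]
          rw [if_neg (fun h : node = e => he (h ▸ hnode))]
          refine ih _ _ (push_keys path _ rest (fun p hp => hs p (List.mem_cons_of_mem _ hp))
            (fun n hn => nbrs_subset node hnode n (List.mem_reverse.mp hn)))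

-- ===== VERDICT (by name: the statement is the Claim_ definition above) =====
theorem find_longest_circuit_spec : Claim_equal_find_longest_circuit := by
  intro s e _ hs
  show find_longest_circuit s e = find_longest_circuit_alt s e
  by_cases he : e ∈ (["A", "B", "C", "D", "E", "F"] : List String)
  · exact all_pairs_eq s hs e he
  · unfold find_longest_circuit find_longest_circuit_alt
    rw [findAllPaths_nil e he 7 s [] hs,
        dfsLoop_nil e he 100000 [(s, [s])] []
          (by intro p hp; rcases List.mem_singleton.mp hp with rfl; exact hs)]
    rfl
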